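-- pv_equiv track=rewrite | github.com/TetroVolt/Pysics | src/calculus.py | specialMinusSplit
-- ===== SOURCE A (Python) =====
-- def specialMinusSplit(str):
--     indexList = [i for i in range(len(str)) if str[i] == '-']
--     lastIndex = 0
--     retList = []
--     for index in indexList:
--         if index==0:
--             continue
--         if str[index-1].isdigit() or str[index-1]=='x':
--             retList.append(str[lastIndex:index])
--             lastIndex = index
--     retList.append(str[lastIndex:])
--     return retList
-- ===== SOURCE B (Python) =====
-- def specialMinusSplit(str):
--     ret = []
--     buf = ""
--     for c in str:
--         if c == '-' and buf and (buf[-1].isdigit() or buf[-1] == 'x'):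
--             ret.append(buf)
--             buf = c
--         else:
--             buf += c
--     ret.append(buf)
--     return ret
-- ===== Notes on version B (the rewrite author's own statement) =====
-- stated objective: simpler
-- what changed: Replaced A's precomputed list of all minus-sign indices plus index-based slicing with a single pass over the characters that keeps a running buffer and flushes it at each split point.
import Mathlib
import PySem

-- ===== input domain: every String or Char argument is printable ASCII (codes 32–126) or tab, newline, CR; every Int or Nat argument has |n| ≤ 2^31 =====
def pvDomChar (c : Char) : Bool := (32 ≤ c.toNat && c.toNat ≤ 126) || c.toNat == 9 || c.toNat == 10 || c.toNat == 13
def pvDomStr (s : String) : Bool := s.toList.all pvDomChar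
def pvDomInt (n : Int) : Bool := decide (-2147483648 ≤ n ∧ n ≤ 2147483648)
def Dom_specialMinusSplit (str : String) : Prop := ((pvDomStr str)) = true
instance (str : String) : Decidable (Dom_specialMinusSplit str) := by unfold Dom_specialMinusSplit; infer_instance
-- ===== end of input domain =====

-- B replaces A's precomputed list of minus-sign indices and index-based slicing by one pass with a running buffer (same result, different decomposition).


-- ===== PORT A =====
-- loop body of A's 'for index in indexList' (str[index-1].isdigit() on a 1-char ASCII string is Chars.isdigit of that char)
def pvStepA (s : List Char) (st : Int × List String) (index : Int) : Int × List String :=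
  if index == 0 then st
  else if (match PySem.List.pyGet? s (index - 1) with
           | some c => PySem.Chars.isdigit c || c == 'x'
           | none => false) then
    (index, st.2 ++ [String.ofList (PySem.List.slice s (some st.1) (some index))])
  else st

def specialMinusSplit (str : String) : List String :=
  let s := str.toList
  let indexList := (PySem.List.pyRange 0 s.length 1).filter (fun i => PySem.List.pyGet? s i == some '-')
  let st := indexList.foldl (pvStepA s) (0, [])
  st.2 ++ [String.ofList (PySem.List.slice s (some st.1) none)]

-- ===== PORT B =====
-- loop body of B's 'for c in str' (buf[-1] is buf.getLast?; empty buf is falsy)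
def pvStepB (st : List String × List Char) (c : Char) : List String × List Char :=
  if c == '-' && (match st.2.getLast? with
                  | some p => PySem.Chars.isdigit p || p == 'x'
                  | none => false) then
    (st.1 ++ [String.ofList st.2], [c])
  else (st.1, st.2 ++ [c])

def specialMinusSplit_alt (str : String) : List String :=
  let st := str.toList.foldl pvStepB ([], [])
  st.1 ++ [String.ofList st.2]

-- ===== PRECONDITION & SPEC =====
def Spec_specialMinusSplit (str : String) (out : List String) : Prop := out = specialMinusSplit_alt str
instance (str : String) (out : List String) : Decidable (Spec_specialMinusSplit str out) := by unfold Spec_specialMinusSplit; infer_instance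

-- ===== CLAIM (what is proved, stated in full; the proofs are below) =====
def Claim_equal_specialMinusSplit : Prop := ∀ (str : String), Dom_specialMinusSplit str → Spec_specialMinusSplit str (specialMinusSplit str)

-- ===== LEMMAS AND PROOFS =====

-- last element of the buffer slice: the character just before position n
lemma pvGetLast_drop_take (l : List Char) (n k : Nat) (hk : k < n) (hn : n ≤ l.length) :
    ((l.take n).drop k).getLast? = l[n-1]? := by
  rw [List.getLast?_eq_getElem?]
  have hlen : ((l.take n).drop k).length = n - k := by
    simp [List.length_take]; omega
  rw [hlen, List.getElem?_drop, List.getElem?_take_of_lt (by omega)]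
  congr 1; omega

-- the invariant connecting A's (lastIndex, retList) fold with B's (ret, buf) fold
lemma pvInv (l : List Char) (n : Nat) (hn : n ≤ l.length) :
    ∃ k : Nat,
      (((PySem.List.pyRange 0 n 1).filter (fun i => PySem.List.pyGet? l i == some '-')).foldl
          (pvStepA l) (0, [])).1 = (k : Int) ∧
      ((l.take n).foldl pvStepB ([], [])).1 =
        (((PySem.List.pyRange 0 n 1).filter (fun i => PySem.List.pyGet? l i == some '-')).foldl
          (pvStepA l) (0, [])).2 ∧
      ((l.take n).foldl pvStepB ([], [])).2 = (l.take n).drop k ∧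
      k ≤ n ∧ (0 < n → k < n) := by
  induction n with
  | zero =>
      exact ⟨0, by simp, by simp,
        by simp, le_refl 0, by omega⟩
  | succ n ih =>
      have hn' : n ≤ l.length := by omega
      have hnl : n < l.length := by omega
      obtain ⟨k, hA1, hB1, hB2, hkn, hklt⟩ := ih hn'
      -- split off position n on both sides
      have hr : PySem.List.pyRange 0 ((n+1 : Nat) : Int) 1
          = PySem.List.pyRange 0 (n : Int) 1 ++ [(n : Int)] := by
        have := PySem.List.pyRange_one_succ_right (a := 0) (b := (n : Int)) (by positivity)
        push_cast
        simpa using this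
      have ht : l.take (n+1) = l.take n ++ [l[n]] := by
        rw [List.take_add_one, List.getElem?_eq_getElem hnl]; rfl
      have hget : PySem.List.pyGet? l (n : Int) = some l[n] := by
        rw [PySem.List.pyGet?_natCast, List.getElem?_eq_getElem hnl]
      have hdr : ∀ (j : Nat), j ≤ n → (l.take n ++ [l[n]]).drop j = (l.take n).drop j ++ [l[n]] := by
        intro j hj
        exact List.drop_append_of_le_length (by simp [List.length_take]; omega)
      rw [hr, List.filter_append, List.foldl_append, ht, List.foldl_append]
      simp only [List.foldl_cons, List.foldl_nil, List.filter_cons, List.filter_nil]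
      by_cases hdash : l[n] = '-'
      · -- position n is a '-'
        have hpred : (PySem.List.pyGet? l (n : Int) == some '-') = true := by
          simp [hget, hdash]
        rw [hpred]
        simp only [if_true, List.foldl_cons, List.foldl_nil]
        by_cases hn0 : n = 0
        · -- index 0 never splits; the buffer was empty
          subst hn0
          have hk0 : k = 0 := by omega
          subst hk0
          simp only [Nat.cast_zero] at hA1 ⊢
          have hbuf : ((l.take 0).foldl pvStepB ([], [])).2 = [] := by simp
          refine ⟨0, ?_, ?_, ?_, by omega, by omega⟩
          · simp [pvStepA]
          · rw [pvStepA, pvStepB, hbuf]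
            simp
          · rw [pvStepB, hbuf]
            simp
        · -- n > 0: both sides look at l[n-1]
          have hkltn : k < n := hklt (by omega)
          have hidx : ((n : Int) == 0) = false := by
            simp; omega
          have hprev : PySem.List.pyGet? l ((n : Int) - 1) = some l[n-1] := by
            have h1 : ((n : Int) - 1) = ((n - 1 : Nat) : Int) := by omega
            rw [h1, PySem.List.pyGet?_natCast, List.getElem?_eq_getElem (by omega)]
          have hlast : (((l.take n).foldl pvStepB ([], [])).2).getLast? = some l[n-1] := by
            rw [hB2, pvGetLast_drop_take l n k hkltn hn', List.getElem?_eq_getElem (by omega)]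
          by_cases hc : (PySem.Chars.isdigit l[n-1] || l[n-1] == 'x') = true
          · -- split here: A appends the slice, B flushes the buffer
            refine ⟨n, ?_, ?_, ?_, by omega, by omega⟩
            · rw [pvStepA, hidx]
              simp only [hprev, hc]
              simp
            · rw [pvStepA, pvStepB, hidx, hlast]
              simp only [hprev, hc, hdash]
              simp only [Bool.false_eq_true, if_false, hB1, hA1, hB2]
              have hsl : PySem.List.slice l (some (k : Int)) (some (n : Int))
                  = (l.drop k).take (n - k) := PySem.List.slice_natCast l k n
              have hdt : (l.take n).drop k = (l.drop k).take (n - k) := List.drop_take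
              simp [hsl, hdt]
            · rw [pvStepB, hlast]
              have hdr' := hdr n (le_refl n)
              rw [hdash] at hdr'
              simp [hdash, hc, hdr']
          · -- no split: A skips, B keeps accumulating
            have hc' : (PySem.Chars.isdigit l[n-1] || l[n-1] == 'x') = false := by
              simpa using hc
            refine ⟨k, ?_, ?_, ?_, by omega, by omega⟩
            · rw [pvStepA, hidx]
              simp only [hprev, hc']
              simpa using hA1
            · rw [pvStepA, pvStepB, hidx, hlast]
              simp only [hprev, hc', hdash]
              simpa using hB1
            · rw [pvStepB, hlast]
              have hdr' := hdr k (by omega)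
              rw [hdash] at hdr'
              simp only [hdash, hc', Bool.and_false, Bool.false_eq_true, if_false, hB2, hdr']
      · -- position n is not a '-': A's filter drops it, B appends to the buffer
        have hpred : (PySem.List.pyGet? l (n : Int) == some '-') = false := by
          simp [hget, hdash]
        rw [hpred]
        simp only [Bool.false_eq_true, if_false, List.foldl_nil]
        have hbeq : (l[n] == '-') = false := by simpa using hdash
        refine ⟨k, hA1, ?_, ?_, by omega, by omega⟩
        · rw [pvStepB]
          simp only [hbeq, Bool.false_and, Bool.false_eq_true, if_false]
          exact hB1
        · rw [pvStepB]
          simp only [hbeq, Bool.false_and, Bool.false_eq_true, if_false, hB2, hdr k hkn]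

-- the two folds produce the same final list, for any character list
lemma pvMain (l : List Char) :
    (((PySem.List.pyRange 0 l.length 1).filter (fun i => PySem.List.pyGet? l i == some '-')).foldl
        (pvStepA l) (0, [])).2
      ++ [String.ofList (PySem.List.slice l
            (some ((((PySem.List.pyRange 0 l.length 1).filter
                (fun i => PySem.List.pyGet? l i == some '-')).foldl (pvStepA l) (0, [])).1)) none)]
    = (l.foldl pvStepB ([], [])).1 ++ [String.ofList (l.foldl pvStepB ([], [])).2] := by
  obtain ⟨k, hA1, hB1, hB2, _, _⟩ := pvInv l l.length (le_refl _)
  rw [List.take_length] at hB1 hB2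
  rw [hA1, hB1, hB2, PySem.List.slice_from_natCast]

-- ===== VERDICT (by name: the statement is the Claim_ definition above) =====
theorem specialMinusSplit_spec : Claim_equal_specialMinusSplit := by
  intro str _
  show specialMinusSplit str = specialMinusSplit_alt str
  exact pvMain str.toList
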